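-- pv_equiv track=rewrite | github.com/shauryajain21/linkup-comparison | Benchmarking/linkup-comparison/quality_analyzer.py | identify_use_cases
-- ===== SOURCE A (Python) =====
-- from typing import Dict, List, Any
--
-- def identify_use_cases(analysis_results: List[Dict]) -> Dict[str, List[str]]:
--     """
--     Identify specific use cases where each API excels
--     """
--     use_cases = {
--         "quantitative_queries": [],  # Queries asking for numbers
--         "location_queries": [],      # Queries about places
--         "comparison_queries": [],    # Queries comparing things
--         "factual_queries": [],       # Simple fact lookups
--         "complex_queries": []        # Multi-part questions
--     }
--
--     for result in analysis_results:
--         query = result["query"]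
--         winner = result.get("winner", "")
--
--         # Classify query type
--         query_lower = query.lower()
--
--         if any(word in query_lower for word in ["how many", "count", "number", "total", "percentage"]):
--             use_cases["quantitative_queries"].append(f"{query} -> Winner: {winner}")
--
--         if any(word in query_lower for word in ["where", "location", "place", "address", "california"]):
--             use_cases["location_queries"].append(f"{query} -> Winner: {winner}")
--
--         if any(word in query_lower for word in ["compare", "versus", "vs", "difference", "better"]):
--             use_cases["comparison_queries"].append(f"{query} -> Winner: {winner}")
--
--         if "?" in query and len(query.split()) < 10:
--             use_cases["factual_queries"].append(f"{query} -> Winner: {winner}")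
--
--         if len(query.split()) > 15 or query.count(",") > 2:
--             use_cases["complex_queries"].append(f"{query} -> Winner: {winner}")
--
--     return use_cases
-- ===== SOURCE B (Python) =====
-- from typing import Dict, List, Any
--
-- def _has_any(words):
--     return lambda q: any(w in q.lower() for w in words)
--
-- _RULES = [
--     ("quantitative_queries", _has_any(["how many", "count", "number", "total", "percentage"])),
--     ("location_queries", _has_any(["where", "location", "place", "address", "california"])),
--     ("comparison_queries", _has_any(["compare", "versus", "vs", "difference", "better"])),
--     ("factual_queries", lambda q: "?" in q and len(q.split()) < 10),
--     ("complex_queries", lambda q: len(q.split()) > 15 or q.count(",") > 2),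
-- ]
--
-- def identify_use_cases(analysis_results: List[Dict]) -> Dict[str, List[str]]:
--     return {
--         name: [
--             f"{r['query']} -> Winner: {r.get('winner', '')}"
--             for r in analysis_results
--             if pred(r["query"])
--         ]
--         for name, pred in _RULES
--     }
-- ===== Notes on version B (the rewrite author's own statement) =====
-- stated objective: alternative
-- what changed: B replaces A's single query-major pass appending into a mutable five-bucket dict with a rule table of (bucket, predicate) pairs, building each bucket as its own filtered comprehension over the results.
import Mathlib
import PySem

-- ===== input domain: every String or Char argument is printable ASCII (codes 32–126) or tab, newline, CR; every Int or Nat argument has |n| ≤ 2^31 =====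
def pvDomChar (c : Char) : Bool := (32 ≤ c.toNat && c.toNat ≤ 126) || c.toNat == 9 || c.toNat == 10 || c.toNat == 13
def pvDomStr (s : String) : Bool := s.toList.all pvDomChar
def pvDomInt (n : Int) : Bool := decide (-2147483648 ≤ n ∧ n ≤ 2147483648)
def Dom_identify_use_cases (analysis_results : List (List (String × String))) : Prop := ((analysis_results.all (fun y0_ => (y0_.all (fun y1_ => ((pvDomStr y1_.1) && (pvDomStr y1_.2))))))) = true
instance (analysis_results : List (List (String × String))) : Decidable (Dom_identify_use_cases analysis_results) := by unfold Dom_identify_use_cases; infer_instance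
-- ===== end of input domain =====

-- B restructures A's single query-major pass over a mutable five-bucket dict into a
-- rule table of (bucket, predicate) pairs, each bucket built by its own filter+map pass
-- (objective: alternative; same contents and order).

-- ===== PORT A =====
-- A: one fold over the results, threading the five bucket lists as state, each result
-- appended to every bucket whose condition holds; buckets assembled at the end.
-- result["query"] / result.get("winner","") are ported as first-match lookup; the
-- KeyError case (no "query" key) is excluded by Pre_.
def pvStepA (st : List String × List String × List String × List String × List String)
    (result : List (String × String)) :
    List String × List String × List String × List String × List String :=
  let query := (List.lookup "query" result).getD ""
  let winner := (List.lookup "winner" result).getD ""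
  let query_lower := PySem.Str.lower query
  let entry := query ++ " -> Winner: " ++ winner
  (if ["how many", "count", "number", "total", "percentage"].any
      (fun w => PySem.Str.isIn w query_lower) then st.1 ++ [entry] else st.1,
   if ["where", "location", "place", "address", "california"].any
      (fun w => PySem.Str.isIn w query_lower) then st.2.1 ++ [entry] else st.2.1,
   if ["compare", "versus", "vs", "difference", "better"].any
      (fun w => PySem.Str.isIn w query_lower) then st.2.2.1 ++ [entry] else st.2.2.1,
   if PySem.Str.isIn "?" query && decide ((PySem.Str.split₀ query).length < 10)
   then st.2.2.2.1 ++ [entry] else st.2.2.2.1,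
   if decide ((PySem.Str.split₀ query).length > 15)
      || decide (PySem.Str.count query "," > 2)
   then st.2.2.2.2 ++ [entry] else st.2.2.2.2)

def identify_use_cases (analysis_results : List (List (String × String))) :
    List (String × List String) :=
  let st := analysis_results.foldl pvStepA ([], [], [], [], [])
  [("quantitative_queries", st.1), ("location_queries", st.2.1),
   ("comparison_queries", st.2.2.1), ("factual_queries", st.2.2.2.1),
   ("complex_queries", st.2.2.2.2)]

-- ===== PORT B =====
def pvHasAny (words : List String) : String → Bool :=
  fun q => words.any (fun w => PySem.Str.isIn w (PySem.Str.lower q))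

def pvRules : List (String × (String → Bool)) :=
  [("quantitative_queries", pvHasAny ["how many", "count", "number", "total", "percentage"]),
   ("location_queries", pvHasAny ["where", "location", "place", "address", "california"]),
   ("comparison_queries", pvHasAny ["compare", "versus", "vs", "difference", "better"]),
   ("factual_queries", fun q =>
      PySem.Str.isIn "?" q && decide ((PySem.Str.split₀ q).length < 10)),
   ("complex_queries", fun q =>
      decide ((PySem.Str.split₀ q).length > 15) || decide (PySem.Str.count q "," > 2))]

def pvEntryB (r : List (String × String)) : String :=
  (List.lookup "query" r).getD "" ++ " -> Winner: " ++ (List.lookup "winner" r).getD ""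

def identify_use_cases_alt (analysis_results : List (List (String × String))) :
    List (String × List String) :=
  pvRules.map (fun rule =>
    (rule.1, (analysis_results.filter
                (fun r => rule.2 ((List.lookup "query" r).getD ""))).map pvEntryB))

-- ===== PRECONDITION & SPEC =====
-- Pre_ excludes results missing the "query" key, where Python A raises KeyError.
def Pre_identify_use_cases (analysis_results : List (List (String × String))) : Prop :=
  (analysis_results.all (fun r => (List.lookup "query" r).isSome)) = true
instance (analysis_results : List (List (String × String))) : Decidable (Pre_identify_use_cases analysis_results) := by unfold Pre_identify_use_cases; infer_instance

def pvWitness_identify_use_cases : (List (List (String × String))) :=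
  [[("query", "how many cats?"), ("winner", "A")], [("query", "where is it")]]

def Spec_identify_use_cases (analysis_results : List (List (String × String))) (out : List (String × List String)) : Prop := out = identify_use_cases_alt analysis_results
instance (analysis_results : List (List (String × String))) (out : List (String × List String)) : Decidable (Spec_identify_use_cases analysis_results out) := by unfold Spec_identify_use_cases; infer_instance

-- ===== CLAIM (what is proved, stated in full; the proofs are below) =====
def Claim_equal_identify_use_cases : Prop := ∀ (analysis_results : List (List (String × String))), Dom_identify_use_cases analysis_results → Pre_identify_use_cases analysis_results → Spec_identify_use_cases analysis_results (identify_use_cases analysis_results)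

-- ===== LEMMAS AND PROOFS =====
-- B-shaped description of one bucket: filter by pred on the query, then map to entries.
def pvBucket (pred : String → Bool) (rs : List (List (String × String))) : List String :=
  (rs.filter (fun r => pred ((List.lookup "query" r).getD ""))).map pvEntryB

-- The five predicates of the rule table, named.
def pvP1 : String → Bool := pvHasAny ["how many", "count", "number", "total", "percentage"]
def pvP2 : String → Bool := pvHasAny ["where", "location", "place", "address", "california"]
def pvP3 : String → Bool := pvHasAny ["compare", "versus", "vs", "difference", "better"]
def pvP4 : String → Bool := fun q =>
  PySem.Str.isIn "?" q && decide ((PySem.Str.split₀ q).length < 10)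
def pvP5 : String → Bool := fun q =>
  decide ((PySem.Str.split₀ q).length > 15) || decide (PySem.Str.count q "," > 2)

lemma pv_if_append (b : Bool) (acc : List String) (e : String) (B : List String) :
    (if b then acc ++ [e] else acc) ++ B = acc ++ (if b then e :: B else B) := by
  cases b <;> simp

lemma pvBucket_cons (p : String → Bool) (r : List (String × String))
    (rs : List (List (String × String))) :
    pvBucket p (r :: rs) =
      if p ((List.lookup "query" r).getD "") then pvEntryB r :: pvBucket p rs
      else pvBucket p rs := by
  simp only [pvBucket, List.filter_cons]
  split <;> simp_all

-- A's fold, from any accumulator, appends exactly the five filtered buckets.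
lemma pv_fold_eq (rs : List (List (String × String)))
    (st : List String × List String × List String × List String × List String) :
    rs.foldl pvStepA st
    = (st.1 ++ pvBucket pvP1 rs, st.2.1 ++ pvBucket pvP2 rs, st.2.2.1 ++ pvBucket pvP3 rs,
       st.2.2.2.1 ++ pvBucket pvP4 rs, st.2.2.2.2 ++ pvBucket pvP5 rs) := by
  induction rs generalizing st with
  | nil => simp [pvBucket]
  | cons r rs ih =>
    rw [List.foldl_cons, ih]
    refine Prod.ext ?_ (Prod.ext ?_ (Prod.ext ?_ (Prod.ext ?_ ?_))) <;>
      · show _ ++ _ = _ ++ _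
        rw [pvBucket_cons, pvStepA, pv_if_append]
        rfl

-- ===== VERDICT (by name: the statement is the Claim_ definition above) =====
theorem identify_use_cases_spec : Claim_equal_identify_use_cases := by
  intro rs _ _
  show identify_use_cases rs = identify_use_cases_alt rs
  unfold identify_use_cases
  rw [pv_fold_eq]
  rfl
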